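-- pv_equiv track=rewrite | github.com/niyuzheno1/Codeforces-Problem-Set2 | practice01172021/694div1/cpp/simulator.py | step
-- ===== SOURCE A (Python) =====
-- def prev(x, n):
--     return (x+n-1)%n
--
-- def next(x, n):
--     return (x+1)%n
--
-- def step(a, x):
--     n = len(a)
--     cards = [0]*n
--     for i in range(0,n):
--         if x == i: # imposter
--             cards[next(i,n)] += a[i]
--         else:
--             cards[prev(i,n)] += a[i]//2
--             cards[next(i,n)] += (a[i]+1)//2
--     return cards
-- ===== SOURCE B (Python) =====
-- def step(a, x):
--     n = len(a)
--     out = []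
--     for j in range(n):
--         p = (j - 1) % n  # the source whose 'next' is j
--         q = (j + 1) % n  # the source whose 'prev' is j
--         got = a[p] if p == x else (a[p] + 1) // 2
--         if q != x:
--             got += a[q] // 2
--         out.append(got)
--     return out
-- ===== Notes on version B (the rewrite author's own statement) =====
-- stated objective: alternative
-- what changed: Replaces A's scatter (zeroed accumulator updated with += at prev/next of each source) by a gather: each destination j directly reads its two neighbouring sources (j-1)%n and (j+1)%n and computes its value in one expression, with no mutable cards array.
import Mathlib
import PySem

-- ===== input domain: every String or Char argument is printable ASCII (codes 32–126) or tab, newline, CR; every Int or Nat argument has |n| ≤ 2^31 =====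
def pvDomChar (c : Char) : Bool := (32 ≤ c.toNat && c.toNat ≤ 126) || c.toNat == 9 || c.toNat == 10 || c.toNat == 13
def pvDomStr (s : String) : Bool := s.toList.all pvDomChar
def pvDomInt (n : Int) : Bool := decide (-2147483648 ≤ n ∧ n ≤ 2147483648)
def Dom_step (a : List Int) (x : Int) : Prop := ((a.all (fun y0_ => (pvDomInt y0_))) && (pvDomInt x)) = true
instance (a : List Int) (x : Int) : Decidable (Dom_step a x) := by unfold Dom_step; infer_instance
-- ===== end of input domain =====

-- B replaces A's scatter loop (zeroed cards array mutated with += at prev/next of each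
-- source) by a gather: each destination j directly reads its two neighbour sources.
-- Objective: alternative (same linear cost, different control flow); exact same values.

-- ===== PORT A =====
def pyprev (x n : Int) : Int := PySem.Int.mod (x + n - 1) n

def pynext (x n : Int) : Int := PySem.Int.mod (x + 1) n

-- cards[k] += v ; in A's loop k is always a mod-n result in [0, n), where pySetD/pyGetD are exact
def addAt (c : List Int) (k v : Int) : List Int :=
  PySem.List.pySetD c k (PySem.List.pyGetD c k 0 + v)

def stepBody (a : List Int) (x n : Int) (cards : List Int) (i : Int) : List Int :=
  if x == i then -- imposter
    addAt cards (pynext i n) (PySem.List.pyGetD a i 0)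
  else
    addAt (addAt cards (pyprev i n) (PySem.Int.floordiv (PySem.List.pyGetD a i 0) 2))
      (pynext i n) (PySem.Int.floordiv (PySem.List.pyGetD a i 0 + 1) 2)

def step (a : List Int) (x : Int) : List Int :=
  let n : Int := PySem.List.len a
  (PySem.List.pyRange 0 n 1).foldl (stepBody a x n) (List.replicate a.length 0)

-- ===== PORT B =====
def gatherAt (a : List Int) (x n j : Int) : Int :=
  let p := PySem.Int.mod (j - 1) n
  let q := PySem.Int.mod (j + 1) n
  let got := if p == x then PySem.List.pyGetD a p 0
             else PySem.Int.floordiv (PySem.List.pyGetD a p 0 + 1) 2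
  if q != x then got + PySem.Int.floordiv (PySem.List.pyGetD a q 0) 2 else got

def step_alt (a : List Int) (x : Int) : List Int :=
  let n : Int := PySem.List.len a
  (PySem.List.pyRange 0 n 1).foldl (fun out j => out ++ [gatherAt a x n j]) []

-- ===== PRECONDITION & SPEC =====
def Spec_step (a : List Int) (x : Int) (out : List Int) : Prop := out = step_alt a x
instance (a : List Int) (x : Int) (out : List Int) : Decidable (Spec_step a x out) := by unfold Spec_step; infer_instance

-- ===== CLAIM (what is proved, stated in full; the proofs are below) =====
def Claim_equal_step : Prop := ∀ (a : List Int) (x : Int), Dom_step a x → Spec_step a x (step a x)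

-- ===== LEMMAS AND PROOFS =====

-- the contribution source i makes to destination j in A's loop body
def contrib (a : List Int) (x n : Int) (j : Nat) (i : Int) : Int :=
  (if pynext i n = (j : Int) then
      (if x = i then PySem.List.pyGetD a i 0
       else PySem.Int.floordiv (PySem.List.pyGetD a i 0 + 1) 2) else 0)
  + (if pyprev i n = (j : Int) then
      (if x = i then 0 else PySem.Int.floordiv (PySem.List.pyGetD a i 0) 2) else 0)

theorem length_addAt (c : List Int) (k v : Int) : (addAt c k v).length = c.length := by
  simp [addAt, PySem.List.length_pySetD]

theorem length_stepBody (a : List Int) (x n : Int) (cards : List Int) (i : Int) :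
    (stepBody a x n cards i).length = cards.length := by
  unfold stepBody; split <;> simp [length_addAt]

theorem length_foldl_stepBody (a : List Int) (x n : Int) (l : List Int) (cards : List Int) :
    (l.foldl (stepBody a x n) cards).length = cards.length := by
  induction l generalizing cards with
  | nil => rfl
  | cons i t ih => rw [List.foldl_cons, ih, length_stepBody]

theorem pyGetD_addAt (c : List Int) (k v : Int) (hk0 : 0 ≤ k) (hk : k < (c.length : Int))
    (j : Nat) :
    PySem.List.pyGetD (addAt c k v) (j : Int) 0 =
      if (j : Int) = k then PySem.List.pyGetD c (j : Int) 0 + v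
      else PySem.List.pyGetD c (j : Int) 0 := by
  rw [addAt, PySem.List.pySetD_of_nonneg _ _ hk0, PySem.List.pyGetD_eq_getElem c 0 hk0 hk]
  simp only [PySem.List.pyGetD_natCast, List.getD_eq_getElem?_getD, List.getElem?_set]
  by_cases hjk : (j : Int) = k
  · have hkj : k.toNat = j := by omega
    have hjl : j < c.length := by omega
    simp [hjk, hkj, hjl]
  · have hkj : k.toNat ≠ j := by omega
    simp [hjk, hkj]

theorem pyGetD_stepBody (a : List Int) (x : Int) (cards : List Int)
    (hlen : cards.length = a.length) (i : Int) (hi0 : 0 ≤ i) (hi : i < (a.length : Int))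
    (j : Nat) :
    PySem.List.pyGetD (stepBody a x (a.length : Int) cards i) (j : Int) 0 =
      PySem.List.pyGetD cards (j : Int) 0 + contrib a x (a.length : Int) j i := by
  have hn : (0 : Int) < (a.length : Int) := by omega
  have hnb : 0 ≤ pynext i (a.length : Int) := PySem.Int.mod_nonneg _ hn
  have hnl : pynext i (a.length : Int) < (a.length : Int) := PySem.Int.mod_lt _ hn
  have hpb : 0 ≤ pyprev i (a.length : Int) := PySem.Int.mod_nonneg _ hn
  have hpl : pyprev i (a.length : Int) < (a.length : Int) := PySem.Int.mod_lt _ hn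
  unfold stepBody
  by_cases hx : x = i
  · rw [if_pos (show (x == i) = true by simp [hx]),
      pyGetD_addAt cards _ _ hnb (by rw [hlen]; exact hnl)]
    unfold contrib
    rw [if_pos hx, if_pos hx, ite_self]
    split_ifs <;> omega
  · rw [if_neg (show ¬ (x == i) = true by simp [hx]),
      pyGetD_addAt _ _ _ hnb (by rw [length_addAt, hlen]; exact hnl),
      pyGetD_addAt cards _ _ hpb (by rw [hlen]; exact hpl)]
    unfold contrib
    rw [if_neg hx, if_neg hx]
    split_ifs <;> omega

theorem pyGetD_foldl_stepBody (a : List Int) (x : Int) (l : List Int) (cards : List Int)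
    (hlen : cards.length = a.length)
    (hmem : ∀ i ∈ l, 0 ≤ i ∧ i < (a.length : Int)) (j : Nat) :
    PySem.List.pyGetD (l.foldl (stepBody a x (a.length : Int)) cards) (j : Int) 0 =
      PySem.List.pyGetD cards (j : Int) 0 + (l.map (contrib a x (a.length : Int) j)).sum := by
  induction l generalizing cards with
  | nil => simp
  | cons i t ih =>
    obtain ⟨hi0, hi1⟩ := hmem i (by simp)
    rw [List.foldl_cons,
      ih (stepBody a x (a.length : Int) cards i) (by rw [length_stepBody]; exact hlen)
        (fun i' hi' => hmem i' (List.mem_cons_of_mem _ hi')),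
      pyGetD_stepBody a x cards hlen i hi0 hi1 j]
    simp only [List.map_cons, List.sum_cons]
    ring

theorem sum_map_ite_single (l : List Int) (f : Int → Int) (i0 : Int)
    (hnd : l.Nodup) (hmem : i0 ∈ l) :
    (l.map (fun i => if i = i0 then f i else 0)).sum = f i0 := by
  induction l with
  | nil => simp at hmem
  | cons h t ih =>
    obtain ⟨hht, hndt⟩ := List.nodup_cons.mp hnd
    simp only [List.map_cons, List.sum_cons]
    rcases List.mem_cons.mp hmem with heq | hm
    · subst heq
      rw [if_pos rfl,
        show (t.map (fun i => if i = i0 then f i else 0)) = t.map (fun _ => (0 : Int)) from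
          List.map_congr_left (fun i hi => if_neg (by rintro rfl; exact hht hi))]
      simp
    · rw [if_neg (by rintro rfl; exact hht hm), ih hndt hm]
      ring

theorem emod_shift_iff (N i j s : Int) (hi0 : 0 ≤ i) (hi1 : i < N) (hj0 : 0 ≤ j) (hj1 : j < N) :
    (i + s) % N = j ↔ i = (j - s) % N := by
  have hi' : i % N = i := Int.emod_eq_of_lt hi0 hi1
  have hj' : j % N = j := Int.emod_eq_of_lt hj0 hj1
  have h1 : ((i + s) % N = j) ↔ N ∣ (i + s - j) := by
    rw [← PySem.Int.emod_eq_zero_iff_dvd, ← Int.emod_eq_emod_iff_emod_sub_eq_zero, hj']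
  have h2 : (i = (j - s) % N) ↔ N ∣ (j - s - i) := by
    rw [← PySem.Int.emod_eq_zero_iff_dvd, ← Int.emod_eq_emod_iff_emod_sub_eq_zero, hi']
    exact eq_comm
  rw [h1, h2, show j - s - i = -(i + s - j) by ring, dvd_neg]

theorem pynext_eq_iff (N i j : Int) (h0 : 0 < N) (hi0 : 0 ≤ i) (hi1 : i < N)
    (hj0 : 0 ≤ j) (hj1 : j < N) :
    pynext i N = j ↔ i = PySem.Int.mod (j - 1) N := by
  rw [pynext, PySem.Int.mod_eq_emod_of_pos h0, PySem.Int.mod_eq_emod_of_pos h0]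
  exact emod_shift_iff N i j 1 hi0 hi1 hj0 hj1

theorem pyprev_eq_iff (N i j : Int) (h0 : 0 < N) (hi0 : 0 ≤ i) (hi1 : i < N)
    (hj0 : 0 ≤ j) (hj1 : j < N) :
    pyprev i N = j ↔ i = PySem.Int.mod (j + 1) N := by
  rw [pyprev, PySem.Int.mod_eq_emod_of_pos h0, PySem.Int.mod_eq_emod_of_pos h0,
    show i + N - 1 = i + (N - 1) by ring,
    emod_shift_iff N i j (N - 1) hi0 hi1 hj0 hj1,
    show j - (N - 1) = j + 1 + N * (-1) by ring, Int.add_mul_emod_self_left]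

theorem gather_val (a : List Int) (x N j : Int) :
    gatherAt a x N j =
      (if x = PySem.Int.mod (j - 1) N then PySem.List.pyGetD a (PySem.Int.mod (j - 1) N) 0
       else PySem.Int.floordiv (PySem.List.pyGetD a (PySem.Int.mod (j - 1) N) 0 + 1) 2)
      + (if x = PySem.Int.mod (j + 1) N then 0
       else PySem.Int.floordiv (PySem.List.pyGetD a (PySem.Int.mod (j + 1) N) 0) 2) := by
  by_cases h1 : x = PySem.Int.mod (j - 1) N
  · by_cases h2 : x = PySem.Int.mod (j + 1) N
    · simp [gatherAt, ← h1, ← h2]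
    · simp [gatherAt, ← h1, h2, Ne.symm h2, bne_iff_ne]
  · by_cases h2 : x = PySem.Int.mod (j + 1) N
    · simp [gatherAt, h1, ← h2, Ne.symm h1]
    · simp [gatherAt, h1, h2, Ne.symm h1, Ne.symm h2, bne_iff_ne]

theorem sum_contrib (a : List Int) (x : Int) (j : Nat) (hj : j < a.length) :
    ((PySem.List.pyRange 0 (a.length : Int) 1).map (contrib a x (a.length : Int) j)).sum =
      gatherAt a x (a.length : Int) (j : Int) := by
  have h0 : (0 : Int) < (a.length : Int) := by omega
  set N := (a.length : Int) with hN
  set p := PySem.Int.mod ((j : Int) - 1) N with hp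
  set q := PySem.Int.mod ((j : Int) + 1) N with hq
  have hp0 : 0 ≤ p := PySem.Int.mod_nonneg _ h0
  have hp1 : p < N := PySem.Int.mod_lt _ h0
  have hq0 : 0 ≤ q := PySem.Int.mod_nonneg _ h0
  have hq1 : q < N := PySem.Int.mod_lt _ h0
  have hj0 : (0 : Int) ≤ (j : Int) := by omega
  have hj1 : (j : Int) < N := by omega
  have hcongr : ∀ i ∈ PySem.List.pyRange 0 N 1,
      contrib a x N j i =
        (if i = p then (if x = i then PySem.List.pyGetD a i 0
            else PySem.Int.floordiv (PySem.List.pyGetD a i 0 + 1) 2) else 0)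
        + (if i = q then (if x = i then 0
            else PySem.Int.floordiv (PySem.List.pyGetD a i 0) 2) else 0) := by
    intro i hi
    obtain ⟨hi0, hi1⟩ := PySem.List.mem_pyRange_one.mp hi
    simp only [contrib, pynext_eq_iff N i (j : Int) h0 hi0 hi1 hj0 hj1,
      pyprev_eq_iff N i (j : Int) h0 hi0 hi1 hj0 hj1, ← hp, ← hq]
  rw [List.map_congr_left hcongr, PySem.List.sum_map_add_int,
    sum_map_ite_single _ _ p (PySem.List.nodup_pyRange_one 0 N)
      (PySem.List.mem_pyRange_one.mpr ⟨hp0, hp1⟩),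
    sum_map_ite_single _ _ q (PySem.List.nodup_pyRange_one 0 N)
      (PySem.List.mem_pyRange_one.mpr ⟨hq0, hq1⟩),
    gather_val, ← hp, ← hq]

theorem step_alt_eq_map (a : List Int) (x : Int) :
    step_alt a x =
      (PySem.List.pyRange 0 (a.length : Int) 1).map (gatherAt a x (a.length : Int)) := by
  simp only [step_alt, PySem.List.len_eq, PySem.List.foldl_append_singleton_eq_map,
    List.nil_append]

-- ===== VERDICT (by name: the statement is the Claim_ definition above) =====
theorem step_spec : Claim_equal_step := by
  intro a x _
  unfold Spec_step
  rw [step_alt_eq_map]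
  have hstep : step a x = (PySem.List.pyRange 0 (a.length : Int) 1).foldl
      (stepBody a x (a.length : Int)) (List.replicate a.length 0) := by
    simp only [step, PySem.List.len_eq]
  apply List.ext_getElem
  · rw [hstep, length_foldl_stepBody, List.length_replicate, List.length_map,
      PySem.List.length_pyRange_one]
    omega
  · intro k h1 h2
    have hk : k < a.length := by
      rw [hstep, length_foldl_stepBody, List.length_replicate] at h1; exact h1
    have hL : (step a x)[k]'h1 = PySem.List.pyGetD (step a x) (k : Int) 0 := by
      rw [PySem.List.pyGetD_natCast, List.getD_eq_getElem _ _ h1]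
    rw [hL, hstep,
      pyGetD_foldl_stepBody a x _ _ (by simp)
        (fun i hi => PySem.List.mem_pyRange_one.mp hi) k,
      sum_contrib a x k hk, List.getElem_map, PySem.List.getElem_pyRange_one]
    simp [PySem.List.pyGetD_natCast, List.getD_eq_getElem?_getD, hk]
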